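-- pv_equiv track=rewrite | github.com/jano31415/codejam | codeforces/775_round_div2/probc.py | solve
-- ===== SOURCE A (Python) =====
-- from collections import defaultdict
--
-- def solve(n,m, grid):
--     color_to_loc = defaultdict(list)
--     for nrow, row in enumerate(grid):
--         for ncol, x in enumerate(row):
--                 color_to_loc[x].append((nrow, ncol))
--
--     # solve x
--     tot=0
--     for c in color_to_loc:
--         onedim = [point[0] for point in color_to_loc[c]]
--         tot+= count_one_dim(onedim)
--     for c in color_to_loc:
--         onedim = [point[1] for point in color_to_loc[c]]
--         tot+= count_one_dim(onedim)
--     return tot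
--
-- def count_one_dim(onedim):
--     onedim.sort()
--     sumall = sum(onedim)
--     nrpoints = len(onedim)
--     this_tot = 0
--     for i,x in enumerate(onedim):
--         this_tot += max(0, sumall - nrpoints*x)
--         nrpoints -= 1
--         sumall -= x
--     return this_tot
-- ===== SOURCE B (Python) =====
-- from collections import defaultdict
--
-- def solve(n, m, grid):
--     groups = defaultdict(list)
--     for r, row in enumerate(grid):
--         for c, x in enumerate(row):
--             groups[x].append((r, c))
--     total = 0
--     for pts in groups.values():
--         for i, (r1, c1) in enumerate(pts):
--             for (r2, c2) in pts[i + 1:]: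
--                 total += abs(r1 - r2) + abs(c1 - c2)
--     return total
-- ===== Notes on version B (the rewrite author's own statement) =====
-- stated objective: simpler
-- what changed: Replaces the per-axis sort plus running suffix-sum/count accumulation (count_one_dim) with a direct sum of Manhattan distances over all unordered pairs within each color group; no sorting, no per-axis projection lists.
import Mathlib
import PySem

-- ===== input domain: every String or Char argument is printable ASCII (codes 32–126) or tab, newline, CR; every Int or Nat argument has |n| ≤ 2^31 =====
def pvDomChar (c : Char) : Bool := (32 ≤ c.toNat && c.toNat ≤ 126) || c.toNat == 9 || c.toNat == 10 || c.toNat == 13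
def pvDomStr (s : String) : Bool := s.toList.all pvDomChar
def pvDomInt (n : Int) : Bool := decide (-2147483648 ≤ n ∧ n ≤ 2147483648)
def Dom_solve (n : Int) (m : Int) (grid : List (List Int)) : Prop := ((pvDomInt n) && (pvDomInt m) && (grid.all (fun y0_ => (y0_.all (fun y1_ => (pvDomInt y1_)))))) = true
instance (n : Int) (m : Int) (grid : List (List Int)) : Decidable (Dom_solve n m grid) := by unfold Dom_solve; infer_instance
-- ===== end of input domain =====

-- B replaces A's per-axis sort + running suffix-sum accumulation with a direct
-- all-pairs Manhattan-distance sum inside each color group (objective: simpler).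

-- ===== PORT A =====
-- count_one_dim: sort in place, then the suffix loop; state = (this_tot, nrpoints, sumall)
def count_one_dim (onedim : List Int) : Int :=
  let s := PySem.List.sorted onedim (fun x => x) false
  (s.foldl (fun (st : Int × Int × Int) x =>
      (st.1 + max 0 (st.2.2 - st.2.1 * x), st.2.1 - 1, st.2.2 - x))
    (0, (s.length : Int), s.sum)).1

-- color_to_loc = defaultdict(list); the append is modify with default []
def buildLoc (grid : List (List Int)) : PySem.Dict Int (List (Int × Int)) :=
  (PySem.List.enumerate grid 0).foldl (fun d nr =>
    (PySem.List.enumerate nr.2 0).foldl (fun d nc =>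
      d.modify nc.2 [] (· ++ [(nr.1, nc.1)])) d) PySem.Dict.empty

def solve (n : Int) (m : Int) (grid : List (List Int)) : Int :=
  let d := buildLoc grid
  let tot1 := d.keys.foldl (fun tot c =>
    tot + count_one_dim ((d.getD c []).map (fun p => p.1))) 0
  d.keys.foldl (fun tot c =>
    tot + count_one_dim ((d.getD c []).map (fun p => p.2))) tot1

-- ===== PORT B =====
-- inner double loop of Source B: each point against the later points (pts[i+1:])
def pairDist : List (Int × Int) → Int
  | [] => 0
  | p :: rest => (rest.map (fun q => |p.1 - q.1| + |p.2 - q.2|)).sum + pairDist rest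

def solve_alt (n : Int) (m : Int) (grid : List (List Int)) : Int :=
  let groups := (PySem.List.enumerate grid 0).foldl (fun d nr =>
    (PySem.List.enumerate nr.2 0).foldl (fun d nc =>
      d.modify nc.2 [] (· ++ [(nr.1, nc.1)])) d) PySem.Dict.empty
  groups.values.foldl (fun total pts => total + pairDist pts) 0

-- ===== PRECONDITION & SPEC =====
def Spec_solve (n : Int) (m : Int) (grid : List (List Int)) (out : Int) : Prop := out = solve_alt n m grid
instance (n : Int) (m : Int) (grid : List (List Int)) (out : Int) : Decidable (Spec_solve n m grid out) := by unfold Spec_solve; infer_instance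

-- ===== CLAIM (what is proved, stated in full; the proofs are below) =====
def Claim_equal_solve : Prop := ∀ (n : Int) (m : Int) (grid : List (List Int)), Dom_solve n m grid → Spec_solve n m grid (solve n m grid)

-- ===== LEMMAS AND PROOFS =====

-- sum of |x - y| over the later elements, structurally: the mathematical pair sum
def pairAbs : List Int → Int
  | [] => 0
  | x :: t => (t.map (fun y => |x - y|)).sum + pairAbs t

theorem pairAbs_perm {l1 l2 : List Int} (h : l1.Perm l2) : pairAbs l1 = pairAbs l2 := by
  induction h with
  | nil => rfl
  | cons x h ih => simp [pairAbs, ih, (h.map _).sum_eq]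
  | swap x y t => simp [pairAbs, abs_sub_comm]; ring
  | trans _ _ ih1 ih2 => exact ih1.trans ih2

theorem sum_map_abs_sub (x : Int) (t : List Int) (hx : ∀ y ∈ t, x ≤ y) :
    (t.map (fun y => |x - y|)).sum = t.sum - (t.length : Int) * x := by
  induction t with
  | nil => simp
  | cons y u ih =>
    have hy : x ≤ y := hx y (List.mem_cons_self)
    rw [List.map_cons, List.sum_cons, ih (fun z hz => hx z (List.mem_cons_of_mem _ hz))]
    have habs : |x - y| = y - x := by rw [abs_sub_comm]; exact abs_of_nonneg (by omega)
    rw [habs]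
    simp only [List.sum_cons, List.length_cons]
    push_cast
    ring

theorem foldl_fst_offset (xs : List Int) (a p s : Int) :
    (xs.foldl (fun (st : Int × Int × Int) x =>
      (st.1 + max 0 (st.2.2 - st.2.1 * x), st.2.1 - 1, st.2.2 - x)) (a, p, s)).1
    = a + (xs.foldl (fun (st : Int × Int × Int) x =>
      (st.1 + max 0 (st.2.2 - st.2.1 * x), st.2.1 - 1, st.2.2 - x)) (0, p, s)).1 := by
  induction xs generalizing a p s with
  | nil => simp
  | cons x t ih =>
    simp only [List.foldl_cons]
    rw [ih, ih (0 + max 0 (s - p * x))]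
    ring

theorem foldl_sorted_eq_pairAbs (xs : List Int) (h : xs.Pairwise (· ≤ ·)) :
    (xs.foldl (fun (st : Int × Int × Int) x =>
      (st.1 + max 0 (st.2.2 - st.2.1 * x), st.2.1 - 1, st.2.2 - x))
      (0, (xs.length : Int), xs.sum)).1 = pairAbs xs := by
  induction xs with
  | nil => rfl
  | cons x t ih =>
    have hx : ∀ y ∈ t, x ≤ y := fun y hy => (List.pairwise_cons.mp h).1 y hy
    have ht : t.Pairwise (· ≤ ·) := (List.pairwise_cons.mp h).2
    have habs := sum_map_abs_sub x t hx
    have hsum : (t.length : Int) * x ≤ t.sum := by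
      have hnn : 0 ≤ (t.map (fun y => |x - y|)).sum := by
        apply List.sum_nonneg
        intro z hz
        obtain ⟨y, _, rfl⟩ := List.mem_map.mp hz
        exact abs_nonneg _
      rw [habs] at hnn
      linarith
    rw [List.foldl_cons]
    dsimp only
    simp only [List.length_cons, List.sum_cons]
    push_cast
    have hinit : ((0 : Int) + max 0 (x + t.sum - ((t.length : Int) + 1) * x),
        (t.length : Int) + 1 - 1, x + t.sum - x)
        = (t.sum - (t.length : Int) * x, (t.length : Int), t.sum) := by
      simp only [Prod.mk.injEq]
      refine ⟨?_, by ring, by ring⟩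
      rw [max_eq_right (by nlinarith)]
      ring
    rw [hinit, foldl_fst_offset, ih ht]
    simp only [pairAbs]
    rw [habs]

theorem count_one_dim_eq_pairAbs (xs : List Int) : count_one_dim xs = pairAbs xs := by
  simp only [count_one_dim]
  rw [foldl_sorted_eq_pairAbs _ (PySem.List.sorted_pairwise xs (fun x => x))]
  exact pairAbs_perm (PySem.List.sorted_perm xs (fun x => x) false)

theorem pairDist_eq (pts : List (Int × Int)) :
    pairDist pts = pairAbs (pts.map (fun p => p.1)) + pairAbs (pts.map (fun p => p.2)) := by
  induction pts with
  | nil => rfl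
  | cons p t ih =>
    simp only [pairDist, pairAbs, List.map_cons, List.map_map, ih, Function.comp_def,
      PySem.List.sum_map_add_int]
    ring

-- the flattened cell list (color, (row, col)) the nested dict-building loop traverses
def cells (grid : List (List Int)) : List (Int × Int × Int) :=
  (PySem.List.enumerate grid 0).flatMap (fun nr =>
    (PySem.List.enumerate nr.2 0).map (fun nc => (nc.2, nr.1, nc.1)))

theorem buildLoc_eq (grid : List (List Int)) :
    buildLoc grid = (cells grid).foldl (fun d p => d.modify p.1 [] (· ++ [p.2])) PySem.Dict.empty := by
  simp only [buildLoc, cells, List.foldl_flatMap, List.foldl_map]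

theorem nodup_keys_buildLoc (grid : List (List Int)) : (buildLoc grid).keys.Nodup := by
  rw [buildLoc_eq]
  exact PySem.Dict.nodup_keys_foldl_modify_key _ _ _ _ _ (by simp)

-- ===== VERDICT (by name: the statement is the Claim_ definition above) =====
theorem solve_spec : Claim_equal_solve := by
  intro n m grid _hd
  unfold Spec_solve
  show solve n m grid = solve_alt n m grid
  have hb : (PySem.List.enumerate grid 0).foldl (fun d nr =>
      (PySem.List.enumerate nr.2 0).foldl (fun d nc =>
        d.modify nc.2 [] (· ++ [(nr.1, nc.1)])) d) PySem.Dict.empty = buildLoc grid := rfl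
  simp only [solve, solve_alt, hb]
  rw [PySem.Dict.values_eq_map_keys (buildLoc grid) (nodup_keys_buildLoc grid) []]
  rw [PySem.List.foldl_add, PySem.List.foldl_add, List.foldl_map, PySem.List.foldl_add]
  simp only [zero_add]
  rw [← PySem.List.sum_map_add_int (buildLoc grid).keys
    (fun c => count_one_dim (((buildLoc grid).getD c []).map (fun p => p.1)))
    (fun c => count_one_dim (((buildLoc grid).getD c []).map (fun p => p.2)))]
  have hpt : ∀ c : Int,
      count_one_dim (((buildLoc grid).getD c []).map (fun p => p.1)) +
      count_one_dim (((buildLoc grid).getD c []).map (fun p => p.2))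
      = pairDist ((buildLoc grid).getD c []) := by
    intro c
    rw [count_one_dim_eq_pairAbs, count_one_dim_eq_pairAbs, pairDist_eq]
  simp only [hpt]
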